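-- pv_equiv track=rewrite | github.com/sshrik/algo-study | algorithm/dijkstra.py | changeNodeOrder
-- ===== SOURCE A (Python) =====
-- def changeNodeOrder(graph, firstIndex):
--     # Change firstIndex`s index item to front.
--     ret = []
--     tempRet = []
--     tempRet += graph[firstIndex:]
--     tempRet += graph[0:firstIndex]
--
--     for retI in tempRet:
--         ret.append([])
--         ret[-1] += retI[firstIndex:]
--         ret[-1] += retI[0:firstIndex]
--     return ret
-- ===== SOURCE B (Python) =====
-- def changeNodeOrder(graph, firstIndex):
--     # Gather through an index permutation: rotate the index sequence once,
--     # then read rows/cells through it.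
--     def order(n):
--         idx = list(range(n))
--         return idx[firstIndex:] + idx[:firstIndex]
--     return [[graph[r][c] for c in order(len(graph[r]))] for r in order(len(graph))]
-- ===== Notes on version B (the rewrite author's own statement) =====
-- stated objective: alternative
-- what changed: Instead of concatenating data slices per row, B builds a rotated index permutation (a sliced range) and gathers every element through index lookups.
import Mathlib
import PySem

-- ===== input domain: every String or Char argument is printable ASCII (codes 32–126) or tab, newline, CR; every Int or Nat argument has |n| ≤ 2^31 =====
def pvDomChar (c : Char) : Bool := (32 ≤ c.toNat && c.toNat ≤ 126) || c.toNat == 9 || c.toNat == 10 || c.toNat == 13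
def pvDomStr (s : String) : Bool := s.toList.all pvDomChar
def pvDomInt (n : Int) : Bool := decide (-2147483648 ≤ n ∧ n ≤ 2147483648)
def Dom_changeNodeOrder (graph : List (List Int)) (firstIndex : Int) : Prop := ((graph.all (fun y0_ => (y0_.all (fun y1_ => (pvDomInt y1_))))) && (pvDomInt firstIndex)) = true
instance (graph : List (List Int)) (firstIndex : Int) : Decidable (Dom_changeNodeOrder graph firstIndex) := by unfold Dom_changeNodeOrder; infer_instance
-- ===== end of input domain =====

-- B gathers elements through a rotated index permutation (a sliced range) instead of A's per-row slice concatenation; same cost, different decomposition.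

-- ===== PORT A =====
def changeNodeOrder (graph : List (List Int)) (firstIndex : Int) : List (List Int) :=
  -- tempRet = [] ; tempRet += graph[firstIndex:] ; tempRet += graph[0:firstIndex]
  let tempRet : List (List Int) :=
    (([] : List (List Int)) ++ PySem.List.slice graph (some firstIndex) none)
      ++ PySem.List.slice graph (some 0) (some firstIndex)
  -- for retI in tempRet: ret.append([]); ret[-1] += retI[firstIndex:]; ret[-1] += retI[0:firstIndex]
  tempRet.foldl
    (fun ret retI =>
      ret ++ [(([] : List Int) ++ PySem.List.slice retI (some firstIndex) none)
                ++ PySem.List.slice retI (some 0) (some firstIndex)])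
    []

-- ===== PORT B =====
-- order(n): idx = list(range(n)); idx[firstIndex:] + idx[:firstIndex]
def pvOrder (n : Nat) (firstIndex : Int) : List Int :=
  let idx : List Int := (List.range n).map Int.ofNat
  PySem.List.slice idx (some firstIndex) none ++ PySem.List.slice idx none (some firstIndex)

def changeNodeOrder_alt (graph : List (List Int)) (firstIndex : Int) : List (List Int) :=
  (pvOrder graph.length firstIndex).map (fun r =>
    let row : List Int := (PySem.List.pyGet? graph r).getD []
    (pvOrder row.length firstIndex).map (fun c => (PySem.List.pyGet? row c).getD 0))

-- ===== PRECONDITION & SPEC =====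
def Spec_changeNodeOrder (graph : List (List Int)) (firstIndex : Int) (out : List (List Int)) : Prop := out = changeNodeOrder_alt graph firstIndex
instance (graph : List (List Int)) (firstIndex : Int) (out : List (List Int)) : Decidable (Spec_changeNodeOrder graph firstIndex out) := by unfold Spec_changeNodeOrder; infer_instance

-- ===== CLAIM (what is proved, stated in full; the proofs are below) =====
def Claim_equal_changeNodeOrder : Prop := ∀ (graph : List (List Int)) (firstIndex : Int), Dom_changeNodeOrder graph firstIndex → Spec_changeNodeOrder graph firstIndex (changeNodeOrder graph firstIndex)

-- ===== LEMMAS AND PROOFS =====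

-- slicing commutes with map (slice is clamped drop/take; length is preserved by map)
lemma slice_map {α β : Type} (f : α → β) (l : List α) (a? b? : Option Int) :
    PySem.List.slice (l.map f) a? b? = (PySem.List.slice l a? b?).map f := by
  simp [PySem.List.slice, PySem.List.clampIdx]

-- reading a list through the identity index sequence reproduces the list
lemma range_map_getD {α : Type} (d : α) (xs : List α) :
    (List.range xs.length).map (fun i => xs.getD i d) = xs := by
  apply List.ext_getElem
  · simp
  · intro i h1 h2
    simp [List.getElem?_eq_getElem h2]

-- gathering xs through any slice of the identity index sequence equals that slice of xs
lemma gather_slice {α : Type} (d : α) (xs : List α) (a? b? : Option Int) :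
    (PySem.List.slice ((List.range xs.length).map Int.ofNat) a? b?).map
        (fun i => (PySem.List.pyGet? xs i).getD d)
      = PySem.List.slice xs a? b? := by
  rw [slice_map, List.map_map]
  have hfun : ∀ i ∈ PySem.List.slice (List.range xs.length) a? b?,
      ((fun i => (PySem.List.pyGet? xs i).getD d) ∘ Int.ofNat) i = xs.getD i d := by
    intro i hi
    have hi' := PySem.List.mem_of_mem_slice _ a? b? hi
    rw [List.mem_range] at hi'
    simp [PySem.List.pyGet?, PySem.List.pyIdx?, hi']
  rw [List.map_congr_left hfun, ← slice_map (fun i => xs.getD i d), range_map_getD]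

-- gathering xs through the rotated index permutation equals A's slice concatenation
lemma gather_eq_slices {α : Type} (d : α) (xs : List α) (fi : Int) :
    (pvOrder xs.length fi).map (fun i => (PySem.List.pyGet? xs i).getD d)
      = PySem.List.slice xs (some fi) none ++ PySem.List.slice xs (some 0) (some fi) := by
  unfold pvOrder
  rw [List.map_append, gather_slice, gather_slice]
  simp

-- A's append-accumulating fold is a map
lemma foldl_snoc (f : List Int → List Int) (l : List (List Int)) (acc : List (List Int)) :
    l.foldl (fun ret retI => ret ++ [f retI]) acc = acc ++ l.map f := by
  induction l generalizing acc with
  | nil => simp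
  | cons x xs ih => simp [List.foldl, ih]

-- ===== VERDICT (by name: the statement is the Claim_ definition above) =====
theorem changeNodeOrder_spec : Claim_equal_changeNodeOrder := by
  intro graph fi _
  show changeNodeOrder graph fi = changeNodeOrder_alt graph fi
  unfold changeNodeOrder changeNodeOrder_alt
  rw [foldl_snoc (fun retI => (([] : List Int) ++ PySem.List.slice retI (some fi) none)
        ++ PySem.List.slice retI (some 0) (some fi))]
  simp only [List.nil_append]
  rw [← gather_eq_slices ([] : List Int) graph fi, List.map_map]
  apply List.map_congr_left
  intro r _
  simp only [Function.comp_apply]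
  rw [← gather_eq_slices (0 : Int) ((PySem.List.pyGet? graph r).getD []) fi]
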